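-- pv_equiv track=rewrite | github.com/SofieGoethals/privacy-agent-anon | src/privacy_benchmark_flexible.py | find_agreement_text
-- ===== SOURCE A (Python) =====
-- from typing import Any, Dict, List, Optional, Tuple
--
-- AGREE_TOKEN = "AGREEMENT:"
--
-- CONFIRM_TOKEN = "CONFIRMED:"
--
-- def find_agreement_text(transcript: List[Dict[str, Any]]) -> str:
--     """Find the final agreement statement."""
--     agreed = ""
--     for m in transcript:
--         c = str(m.get("content") or "")
--         for token in (AGREE_TOKEN, CONFIRM_TOKEN):
--             if token in c:
--                 idx = c.rfind(token)
--                 agreed = c[idx:].strip()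
--     return agreed
-- ===== SOURCE B (Python) =====
-- from typing import Any, Dict, List
--
-- AGREE_TOKEN = "AGREEMENT:"
--
-- CONFIRM_TOKEN = "CONFIRMED:"
--
-- def find_agreement_text(transcript: List[Dict[str, Any]]) -> str:
--     """Find the final agreement statement (backward scan, early exit)."""
--     for m in reversed(transcript):
--         c = str(m.get("content") or "")
--         if CONFIRM_TOKEN in c:
--             return c[c.rfind(CONFIRM_TOKEN):].strip()
--         if AGREE_TOKEN in c:
--             return c[c.rfind(AGREE_TOKEN):].strip()
--     return ""
-- ===== Notes on version B (the rewrite author's own statement) =====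
-- stated objective: idiomatic
-- what changed: Replaces the forward full pass that keeps overwriting an accumulator (with an inner loop over the two tokens) by a reversed scan that returns at the first (i.e. last) message containing a token, checking CONFIRMED before AGREEMENT.
import Mathlib
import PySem

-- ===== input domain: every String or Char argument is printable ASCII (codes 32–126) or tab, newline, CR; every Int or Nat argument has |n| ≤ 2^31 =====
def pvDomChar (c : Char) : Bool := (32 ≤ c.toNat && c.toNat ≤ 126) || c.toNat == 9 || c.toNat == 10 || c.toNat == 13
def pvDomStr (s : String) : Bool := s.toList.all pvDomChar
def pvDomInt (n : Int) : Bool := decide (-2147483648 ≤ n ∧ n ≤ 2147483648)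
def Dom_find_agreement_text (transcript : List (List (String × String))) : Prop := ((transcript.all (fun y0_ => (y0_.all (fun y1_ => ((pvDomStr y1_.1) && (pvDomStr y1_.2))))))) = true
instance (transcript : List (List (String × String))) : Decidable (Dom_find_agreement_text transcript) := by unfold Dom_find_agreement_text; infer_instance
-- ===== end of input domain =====

-- B replaces A's forward full pass with an idiomatic reversed scan that returns at the last token-bearing message.
-- ===== PORT A =====
def find_agreement_text (transcript : List (List (String × String))) : String :=
  transcript.foldl (fun agreed m =>
    -- c = str(m.get("content") or ""): values are strings, so this is lookup with default ""
    let c := PySem.Dict.getD (PySem.Dict.mk m) "content" ""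
    ["AGREEMENT:", "CONFIRMED:"].foldl (fun agreed token =>
      if PySem.Str.isIn token c then
        PySem.Str.strip (PySem.Str.slice c (some (PySem.Str.rfind c token)) none)
      else agreed) agreed) ""

-- ===== PORT B =====
def find_agreement_text_altGo : List (List (String × String)) → String
  | [] => ""
  | m :: rest =>
    let c := PySem.Dict.getD (PySem.Dict.mk m) "content" ""
    if PySem.Str.isIn "CONFIRMED:" c then
      PySem.Str.strip (PySem.Str.slice c (some (PySem.Str.rfind c "CONFIRMED:")) none)
    else if PySem.Str.isIn "AGREEMENT:" c then
      PySem.Str.strip (PySem.Str.slice c (some (PySem.Str.rfind c "AGREEMENT:")) none)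
    else find_agreement_text_altGo rest

def find_agreement_text_alt (transcript : List (List (String × String))) : String :=
  find_agreement_text_altGo transcript.reverse

-- ===== PRECONDITION & SPEC =====
def Spec_find_agreement_text (transcript : List (List (String × String))) (out : String) : Prop := out = find_agreement_text_alt transcript
instance (transcript : List (List (String × String))) (out : String) : Decidable (Spec_find_agreement_text transcript out) := by unfold Spec_find_agreement_text; infer_instance

-- ===== CLAIM (what is proved, stated in full; the proofs are below) =====
def Claim_equal_find_agreement_text : Prop := ∀ (transcript : List (List (String × String))), Dom_find_agreement_text transcript → Spec_find_agreement_text transcript (find_agreement_text transcript)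

-- ===== LEMMAS AND PROOFS =====

-- per-message update of A (what one iteration of A's outer loop does to the accumulator)
def pvStep (acc : String) (m : List (String × String)) : String :=
  let c := PySem.Dict.getD (PySem.Dict.mk m) "content" ""
  ["AGREEMENT:", "CONFIRMED:"].foldl (fun agreed token =>
    if PySem.Str.isIn token c then
      PySem.Str.strip (PySem.Str.slice c (some (PySem.Str.rfind c token)) none)
    else agreed) acc

-- B's scan with an explicit fallback value
def pvGo (l : List (List (String × String))) (f : String) : String :=
  match l with
  | [] => f
  | m :: rest =>
    let c := PySem.Dict.getD (PySem.Dict.mk m) "content" ""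
    if PySem.Str.isIn "CONFIRMED:" c then
      PySem.Str.strip (PySem.Str.slice c (some (PySem.Str.rfind c "CONFIRMED:")) none)
    else if PySem.Str.isIn "AGREEMENT:" c then
      PySem.Str.strip (PySem.Str.slice c (some (PySem.Str.rfind c "AGREEMENT:")) none)
    else pvGo rest f

theorem pvGo_altGo (l : List (List (String × String))) :
    find_agreement_text_altGo l = pvGo l "" := by
  induction l with
  | nil => rfl
  | cons m rest ih =>
    simp only [find_agreement_text_altGo, pvGo, ih]

theorem pvGo_singleton (m : List (String × String)) (f : String) :
    pvGo [m] f = pvStep f m := by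
  simp only [pvGo, pvStep, List.foldl]

theorem pvGo_append_singleton (xs : List (List (String × String))) (m : List (String × String)) (f : String) :
    pvGo (xs ++ [m]) f = pvGo xs (pvStep f m) := by
  induction xs with
  | nil => simp only [List.nil_append, pvGo_singleton, pvGo]
  | cons x rest ih =>
    simp only [List.cons_append, pvGo, ih]

theorem pvFoldl_eq_pvGo_reverse (l : List (List (String × String))) (acc : String) :
    l.foldl pvStep acc = pvGo l.reverse acc := by
  induction l generalizing acc with
  | nil => rfl
  | cons m rest ih =>
    simp only [List.foldl_cons, List.reverse_cons, ih, pvGo_append_singleton]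

-- ===== VERDICT (by name: the statement is the Claim_ definition above) =====
theorem find_agreement_text_spec : Claim_equal_find_agreement_text := by
  intro transcript _
  show find_agreement_text transcript = find_agreement_text_alt transcript
  have hA : find_agreement_text transcript = transcript.foldl pvStep "" := rfl
  rw [hA, pvFoldl_eq_pvGo_reverse, find_agreement_text_alt, pvGo_altGo]
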